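-- pv_equiv track=rewrite | github.com/sakuri932/assignment1-basics | extra_guidance/bpe_no_regex.py | _pretokenize
-- ===== SOURCE A (Python) =====
-- import unicodedata
--
-- def _char_type(c: str) -> str:
--     """
--     返回字符的类型标签，用于预分词时判断类型边界。
--
--     输入：单个 Unicode 字符
--     输出：'L'（字母）/ 'N'（数字）/ 'S'（空白）/ 'O'（其他）
--
--     使用 unicodedata.category() 获取 Unicode 通用类别，
--     取首字母判断大类，覆盖所有语言的字母和数字。
--     """
--     cat = unicodedata.category(c)
--     if cat[0] == 'L':
--         return 'L'
--     if cat[0] == 'N':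
--         return 'N'
--     if cat[0] == 'Z' or c in '\t\n\r\x0b\x0c':
--         return 'S'
--     return 'O'
--
-- def _pretokenize(text: str) -> list[str]:
--     """
--     将文本切分为预分词单元：连续相同类型的字符归为一组。
--
--     输入：
--         text (str): 任意文本
--
--     输出：
--         list[str]: 预分词单元列表
--         示例：
--             "hello world" → ["hello", " ", "world"]
--             "3.14 ok"     → ["3", ".", "14", " ", "ok"]
--             "it's"        → ["it", "'", "s"]
--
--     实现：
--         遍历每个字符，记录当前段的起始位置和类型。
--         字符类型发生变化时，将当前段作为一个单元切出，重新开始。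
--     """
--     if not text:
--         return []
--
--     tokens: list[str] = []
--     start = 0
--     current_type = _char_type(text[0])
--
--     for i in range(1, len(text)):
--         t = _char_type(text[i])
--         if t != current_type:
--             tokens.append(text[start:i])
--             start = i
--             current_type = t
--
--     tokens.append(text[start:])   # 最后一段
--     return tokens
-- ===== SOURCE B (Python) =====
-- import unicodedata
-- from itertools import groupby
--
-- def _char_type(c: str) -> str:
--     cat = unicodedata.category(c)
--     if cat[0] == 'L':
--         return 'L'
--     if cat[0] == 'N':
--         return 'N'
--     if cat[0] == 'Z' or c in '\t\n\r\x0b\x0c':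
--         return 'S'
--     return 'O'
--
-- def _pretokenize(text: str) -> list[str]:
--     return ["".join(chars) for _, chars in groupby(text, _char_type)]
-- ===== Notes on version B (the rewrite author's own statement) =====
-- stated objective: idiomatic
-- what changed: Replaced the manual start-index/current-type loop with slicing by itertools.groupby keyed on _char_type, joining each group; the empty-text guard disappears since groupby over '' yields no groups.
import Mathlib
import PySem

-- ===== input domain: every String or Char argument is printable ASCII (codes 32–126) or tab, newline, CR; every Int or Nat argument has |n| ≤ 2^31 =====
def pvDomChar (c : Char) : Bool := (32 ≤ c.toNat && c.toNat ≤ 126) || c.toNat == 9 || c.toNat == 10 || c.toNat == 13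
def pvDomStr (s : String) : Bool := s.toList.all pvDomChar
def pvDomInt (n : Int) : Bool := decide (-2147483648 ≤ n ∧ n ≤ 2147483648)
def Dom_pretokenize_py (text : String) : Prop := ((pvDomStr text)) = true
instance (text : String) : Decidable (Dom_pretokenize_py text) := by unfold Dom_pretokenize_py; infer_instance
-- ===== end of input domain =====

-- B replaces A's start-index/current-type loop by grouping consecutive same-type chars (itertools.groupby); objective: idiomatic.

-- _char_type: exact on Dom's characters (ASCII 32–126, tab, LF, CR): ASCII letters are
-- category L*, ASCII digits N*, ' ' is Zs, and tab/LF/CR are in the '\t\n\r\x0b\x0c' list.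
def charType (c : Char) : String :=
  if ('A' ≤ c ∧ c ≤ 'Z') ∨ ('a' ≤ c ∧ c ≤ 'z') then "L"
  else if '0' ≤ c ∧ c ≤ '9' then "N"
  else if c = ' ' ∨ c = '\t' ∨ c = '\n' ∨ c = '\r' ∨ c = '\x0b' ∨ c = '\x0c' then "S"
  else "O"

-- ===== PORT A =====
-- A's for-loop over range(1, len(text)) with state (tokens, start, current_type);
-- text[start:i] with 0 ≤ start ≤ i ≤ len — equals take/drop on the char list, exact here.
def aGo (cs : List Char) (i : Nat) (tokens : List String) (start : Nat) (ct : String) :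
    List String :=
  if h : i < cs.length then
    let t := charType (cs.getD i ' ')
    if t ≠ ct then
      aGo cs (i + 1) (tokens ++ [String.mk ((cs.drop start).take (i - start))]) i t
    else
      aGo cs (i + 1) tokens start ct
  else
    tokens ++ [String.mk (cs.drop start)]
termination_by cs.length - i
decreasing_by all_goals omega

def pretokenize_py (text : String) : List String :=
  if text.toList = [] then []
  else aGo text.toList 1 [] 0 (charType (text.toList.getD 0 ' '))

-- ===== PORT B =====
-- itertools.groupby(text, _char_type): peel off the maximal run of characters whose
-- type equals the type of the run's first character, join it, recurse on the rest.
def groupRuns : List Char → List String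
  | [] => []
  | c :: cs =>
    let p := cs.span (fun d => charType d == charType c)
    String.mk (c :: p.1) :: groupRuns p.2
termination_by cs => cs.length
decreasing_by
  simp only [List.span_eq_takeWhile_dropWhile]
  exact Nat.lt_succ_of_le (List.length_dropWhile_le _ _)

def pretokenize_py_alt (text : String) : List String :=
  groupRuns text.toList

-- ===== PRECONDITION & SPEC =====
def Spec_pretokenize_py (text : String) (out : List String) : Prop := out = pretokenize_py_alt text
instance (text : String) (out : List String) : Decidable (Spec_pretokenize_py text out) := by unfold Spec_pretokenize_py; infer_instance

-- ===== CLAIM (what is proved, stated in full; the proofs are below) =====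
def Claim_equal_pretokenize_py : Prop := ∀ (text : String), Dom_pretokenize_py text → Spec_pretokenize_py text (pretokenize_py text)

-- ===== LEMMAS AND PROOFS =====

theorem getD_append_cons (pre : List Char) (d : Char) (rest : List Char) :
    (pre ++ d :: rest).getD pre.length ' ' = d := by
  simp [List.getD, List.getElem?_append_right (Nat.le_refl pre.length)]

theorem groupRuns_nil : groupRuns [] = [] := by
  rw [groupRuns]

theorem groupRuns_cons (c : Char) (cs : List Char) :
    groupRuns (c :: cs) =
      String.mk (c :: cs.takeWhile (fun d => charType d == charType c)) ::
        groupRuns (cs.dropWhile (fun d => charType d == charType c)) := by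
  rw [groupRuns]
  simp [List.span_eq_takeWhile_dropWhile]

theorem aGo_eq (rest : List Char) : ∀ (pre seg : List Char) (tokens : List String) (ct : String),
    aGo (pre ++ (seg ++ rest)) (pre.length + seg.length) tokens pre.length ct =
      tokens ++ (String.mk (seg ++ rest.takeWhile (fun d => charType d == ct)) ::
        groupRuns (rest.dropWhile (fun d => charType d == ct))) := by
  induction rest with
  | nil =>
    intro pre seg tokens ct
    rw [aGo]
    simp [groupRuns_nil]
  | cons d rest ih =>
    intro pre seg tokens ct
    have hget : (pre ++ (seg ++ d :: rest)).getD (pre.length + seg.length) ' ' = d := by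
      have := getD_append_cons (pre ++ seg) d rest
      simpa [List.append_assoc] using this
    have hlen : pre.length + seg.length < (pre ++ (seg ++ d :: rest)).length := by
      simp
    rw [aGo]
    simp only [hlen, dif_pos, hget]
    by_cases hct : charType d = ct
    · -- same type: run continues, segment grows
      simp only [hct, ne_eq, not_true_eq_false, if_false]
      have := ih pre (seg ++ [d]) tokens ct
      simp only [List.append_assoc, List.cons_append, List.nil_append, List.length_append,
        List.length_cons, List.length_nil, Nat.add_zero, Nat.zero_add, Nat.add_assoc] at this ⊢
      rw [this, List.takeWhile_cons, List.dropWhile_cons]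
      simp [hct]
    · -- type changed: emit the segment, start a new run at d
      simp only [ne_eq, hct, not_false_eq_true, if_true]
      have hslice : ((pre ++ (seg ++ d :: rest)).drop pre.length).take
          (pre.length + seg.length - pre.length) = seg := by
        rw [List.drop_left]
        simp [List.take_left']
      rw [hslice]
      have := ih (pre ++ seg) [d] (tokens ++ [String.mk seg]) (charType d)
      simp only [List.append_assoc, List.cons_append, List.nil_append, List.length_append,
        List.length_cons, List.length_nil, Nat.add_zero, Nat.zero_add, Nat.add_assoc] at this ⊢
      rw [this, List.takeWhile_cons, List.dropWhile_cons]
      simp [hct, groupRuns_cons]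

-- ===== VERDICT (by name: the statement is the Claim_ definition above) =====
theorem pretokenize_py_spec : Claim_equal_pretokenize_py := by
  intro text _
  unfold Spec_pretokenize_py pretokenize_py pretokenize_py_alt
  cases h : text.toList with
  | nil => simp [groupRuns_nil]
  | cons c cs =>
    simp only [h, reduceCtorEq, if_false]
    have := aGo_eq cs [] [c] [] (charType c)
    simpa [groupRuns_cons] using this
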